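-- pv_equiv track=rewrite | github.com/jrbergen/adventofcode-jrb | day16/day16.py | discard_invalid_tickets
-- ===== SOURCE A (Python) =====
-- from typing import List, Tuple, Dict, NoReturn, Optional
--
-- def get_allbounds(fields: Dict[str, List[int]]) -> Tuple[List[int], List[int]]:
--     lbounds, ubounds = [], []
--     for bounds in fields.values():
--         lbounds.extend(bounds[::2])
--         ubounds.extend(bounds[1::2])
--     return lbounds, ubounds
--
-- def discard_invalid_tickets(fields: Dict[str, List[int]],
--                             tickets: List[List[int]]) -> List[List[int]]:
--     lbounds, ubounds = get_allbounds(fields)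
--     min_lbound, max_ubound = min(lbounds), max(ubounds)
--     valid_tickets = []
--     for ticket in tickets:
--         for ticketval in ticket:
--             if ticketval < min_lbound or ticketval > max(ubounds):
--                 break
--             elif not any([lb <= ticketval <= ub for lb, ub in zip(lbounds, ubounds)]):
--                 break
--         else:
--             valid_tickets.append(ticket)
--     return valid_tickets
-- ===== SOURCE B (Python) =====
-- def discard_invalid_tickets(fields, tickets):
--     lbounds, ubounds = [], []
--     for bounds in fields.values():
--         lbounds.extend(bounds[::2])
--         ubounds.extend(bounds[1::2])
--     merged = []
--     for lb, ub in sorted(zip(lbounds, ubounds), key=lambda p: p[0]):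
--         if merged and lb <= merged[-1][1]:
--             if ub > merged[-1][1]:
--                 merged[-1] = (merged[-1][0], ub)
--         else:
--             merged.append((lb, ub))
--     return [t for t in tickets
--             if all(any(l <= v <= u for l, u in merged) for v in t)]
-- ===== Notes on version B (the rewrite author's own statement) =====
-- stated objective: faster
-- what changed: B extracts the (lower,upper) range pairs once, sorts them by lower bound and merges overlapping ranges into a short list of disjoint intervals, then filters tickets against the merged list - removing A's re-computed max(ubounds) on every single ticket value and its per-value scan of every raw range.
-- crash fix: When every field's bounds list has fewer than two entries there are no complete ranges and A raises ValueError (min()/max() of an empty sequence); B's merged interval list is simply empty, so it returns only the tickets with no values (the empty tickets). — e.g. on discard_invalid_tickets([("row", [1])], [[], [2]]): A raises ValueError, B returns [[]]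
import Mathlib
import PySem

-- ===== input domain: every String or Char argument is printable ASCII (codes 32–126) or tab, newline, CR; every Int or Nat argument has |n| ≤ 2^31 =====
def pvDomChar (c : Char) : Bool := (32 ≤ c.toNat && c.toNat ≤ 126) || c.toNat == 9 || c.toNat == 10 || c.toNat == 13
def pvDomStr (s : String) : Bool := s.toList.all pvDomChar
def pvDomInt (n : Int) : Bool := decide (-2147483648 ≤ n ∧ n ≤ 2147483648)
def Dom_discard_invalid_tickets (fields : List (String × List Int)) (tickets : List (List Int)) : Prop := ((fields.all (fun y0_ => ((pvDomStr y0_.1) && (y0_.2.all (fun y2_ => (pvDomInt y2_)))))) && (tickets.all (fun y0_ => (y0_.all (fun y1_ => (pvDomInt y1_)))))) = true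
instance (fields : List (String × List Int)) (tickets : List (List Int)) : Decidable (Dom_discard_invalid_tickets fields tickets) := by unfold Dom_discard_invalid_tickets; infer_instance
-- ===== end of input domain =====

-- B replaces A's per-value scan of every range (with a re-computed max(ubounds) on each value)
-- by a one-time sort-and-merge of the ranges into disjoint intervals followed by a plain filter;
-- objective: faster (measured).

-- ===== PORT A =====
-- value ∈ some range, i.e. Python's  any([lb <= v <= ub for lb, ub in zip(…)])  (also used by B's port)
def pvCov (ivs : List (Int × Int)) (v : Int) : Bool :=
  ivs.any (fun p => decide (p.1 ≤ v) && decide (v ≤ p.2))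

-- get_allbounds: lbounds.extend(bounds[::2]); ubounds.extend(bounds[1::2]) over fields.values()
-- (B's Python runs the identical extraction loop inline, so its port calls this helper too)
def pvGetAllbounds (fields : List (String × List Int)) : List Int × List Int :=
  (PySem.Dict.ofList fields).values.foldl
    (fun acc bounds =>
      (acc.1 ++ (PySem.List.slice? bounds none none 2).getD [],
       acc.2 ++ (PySem.List.slice? bounds (some 1) none 2).getD []))
    ([], [])

-- the inner  for ticketval in ticket: … break … else: append  loop (true = no break)
def pvTicketOk (lbounds ubounds : List Int) (minL : Int) : List Int → Bool
  | [] => true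
  | v :: rest =>
    if v < minL || (PySem.List.max? ubounds (fun x => x)).getD 0 < v then false
    else if !(pvCov (lbounds.zip ubounds) v) then false
    else pvTicketOk lbounds ubounds minL rest

def discard_invalid_tickets (fields : List (String × List Int)) (tickets : List (List Int)) : List (List Int) :=
  let bnds := pvGetAllbounds fields
  match PySem.List.min? bnds.1 (fun x => x), PySem.List.max? bnds.2 (fun x => x) with
  | some minL, some _maxU =>
      tickets.foldl (fun acc t => if pvTicketOk bnds.1 bnds.2 minL t then acc ++ [t] else acc) []
  | _, _ => []   -- unreachable under Pre_: Python raises ValueError (min/max of an empty sequence)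

-- ===== PORT B =====
-- one step of B's interval merge (merged[-1] is the accumulator's last element)
def pvMergeStep (acc : List (Int × Int)) (p : Int × Int) : List (Int × Int) :=
  match acc.getLast? with
  | some q =>
      if p.1 ≤ q.2 then
        (if q.2 < p.2 then acc.dropLast ++ [(q.1, p.2)] else acc)
      else acc ++ [p]
  | none => [p]

def discard_invalid_tickets_alt (fields : List (String × List Int)) (tickets : List (List Int)) : List (List Int) :=
  let bnds := pvGetAllbounds fields
  let merged := (PySem.List.sorted (bnds.1.zip bnds.2) (fun p => p.1)).foldl pvMergeStep []
  tickets.filter (fun t => t.all (fun v => pvCov merged v))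

-- ===== PRECONDITION & SPEC =====
-- Pre_ excludes exactly the inputs where Python A raises ValueError: min(lbounds)/max(ubounds) of
-- an empty sequence, i.e. when no field's bounds list contains a complete (lower, upper) pair.
def Pre_discard_invalid_tickets (fields : List (String × List Int)) (tickets : List (List Int)) : Prop :=
  ∃ bs ∈ (PySem.Dict.ofList fields).values, 2 ≤ bs.length
instance (fields : List (String × List Int)) (tickets : List (List Int)) : Decidable (Pre_discard_invalid_tickets fields tickets) := by unfold Pre_discard_invalid_tickets; infer_instance
def pvWitness_discard_invalid_tickets : (List (String × List Int)) × List (List Int) :=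
  ([("row", [1, 5])], [[3], [9]])

-- When every field's bounds list has fewer than two entries there are no complete ranges and A
-- raises ValueError (min()/max() of an empty sequence); B's merged interval list is empty, so it
-- returns only the tickets with no values.
def Raises_discard_invalid_tickets (fields : List (String × List Int)) (tickets : List (List Int)) : Prop :=
  ∀ bs ∈ (PySem.Dict.ofList fields).values, bs.length ≤ 1
instance (fields : List (String × List Int)) (tickets : List (List Int)) : Decidable (Raises_discard_invalid_tickets fields tickets) := by unfold Raises_discard_invalid_tickets; infer_instance
def pvRaiseWitness_discard_invalid_tickets : (List (String × List Int)) × List (List Int) :=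
  ([("row", [1])], [[], [2]])
def pvRaiseWitnessOut_discard_invalid_tickets : List (List Int) := [[]]

def Spec_discard_invalid_tickets (fields : List (String × List Int)) (tickets : List (List Int)) (out : List (List Int)) : Prop := out = discard_invalid_tickets_alt fields tickets
instance (fields : List (String × List Int)) (tickets : List (List Int)) (out : List (List Int)) : Decidable (Spec_discard_invalid_tickets fields tickets out) := by unfold Spec_discard_invalid_tickets; infer_instance

-- ===== CLAIM (what is proved, stated in full; the proofs are below) =====
def Claim_equal_discard_invalid_tickets : Prop := ∀ (fields : List (String × List Int)) (tickets : List (List Int)), Dom_discard_invalid_tickets fields tickets → Pre_discard_invalid_tickets fields tickets → Spec_discard_invalid_tickets fields tickets (discard_invalid_tickets fields tickets)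
def Claim_raises_discard_invalid_tickets : Prop := (∀ (fields : List (String × List Int)) (tickets : List (List Int)), Dom_discard_invalid_tickets fields tickets → Raises_discard_invalid_tickets fields tickets → ¬ Pre_discard_invalid_tickets fields tickets) ∧ (Dom_discard_invalid_tickets (pvRaiseWitness_discard_invalid_tickets.1) (pvRaiseWitness_discard_invalid_tickets.2) ∧ Raises_discard_invalid_tickets (pvRaiseWitness_discard_invalid_tickets.1) (pvRaiseWitness_discard_invalid_tickets.2) ∧ discard_invalid_tickets_alt (pvRaiseWitness_discard_invalid_tickets.1) (pvRaiseWitness_discard_invalid_tickets.2) = pvRaiseWitnessOut_discard_invalid_tickets)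

-- ===== LEMMAS AND PROOFS =====

-- the bounds-extraction fold, in closed form
lemma pvGetAllbounds_eq (fields : List (String × List Int)) :
    pvGetAllbounds fields =
      (((PySem.Dict.ofList fields).values.map (fun bs => (PySem.List.slice? bs none none 2).getD [])).flatten,
       ((PySem.Dict.ofList fields).values.map (fun bs => (PySem.List.slice? bs (some 1) none 2).getD [])).flatten) := by
  unfold pvGetAllbounds
  generalize (PySem.Dict.ofList fields).values = l
  induction l using List.reverseRecOn with
  | nil => simp
  | append_singleton xs x ih => simp [List.foldl_append, ih]

-- bs[::2] is nonempty when len(bs) ≥ 2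
lemma slice?_even_ne_nil (bs : List Int) (h : 2 ≤ bs.length) :
    (PySem.List.slice? bs none none 2).getD [] ≠ [] := by
  have h1 : (1:ℤ) < (bs.length:ℤ) := by exact_mod_cast h
  simp only [PySem.List.slice?, PySem.List.sliceIndices]
  norm_num
  refine ⟨0, ?_, ?_⟩
  · rw [if_pos (show 0 < bs.length by omega)]; omega
  · omega

-- bs[1::2] is nonempty when len(bs) ≥ 2
lemma slice?_odd_ne_nil (bs : List Int) (h : 2 ≤ bs.length) :
    (PySem.List.slice? bs (some 1) none 2).getD [] ≠ [] := by
  have h1 : (1:ℤ) < (bs.length:ℤ) := by exact_mod_cast h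
  simp only [PySem.List.slice?, PySem.List.sliceIndices]
  norm_num
  refine ⟨0, ?_, ?_⟩
  · rw [if_pos (show 1 < bs.length by omega)]; omega
  · omega

-- pvTicketOk coincides with "every value covered by some (lb, ub) pair": the min/max guard is redundant
lemma pvTicketOk_eq_all (lbounds ubounds : List Int) (minL maxU : Int)
    (hmin : PySem.List.min? lbounds (fun x => x) = some minL)
    (hmax : PySem.List.max? ubounds (fun x => x) = some maxU)
    (t : List Int) :
    pvTicketOk lbounds ubounds minL t = t.all (fun v => pvCov (lbounds.zip ubounds) v) := by
  induction t with
  | nil => rfl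
  | cons v rest ih =>
    have hguard : (v < minL ∨ maxU < v) → pvCov (lbounds.zip ubounds) v = false := by
      intro hg
      rw [← Bool.not_eq_true]
      intro hcov
      simp only [pvCov, List.any_eq_true, Bool.and_eq_true, decide_eq_true_eq] at hcov
      obtain ⟨⟨l, u⟩, hmem, hle, hge⟩ := hcov
      have hlu := List.of_mem_zip hmem
      have h1 := PySem.List.min?_isMin hmin l hlu.1
      have h2 := PySem.List.max?_isMax hmax u hlu.2
      simp only at h1 h2
      rcases hg with hg | hg <;> omega
    simp only [pvTicketOk, hmax, Option.getD_some, List.all_cons]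
    by_cases hg : v < minL ∨ maxU < v
    · have := hguard hg
      rw [if_pos (by rcases hg with hg | hg <;> simp [hg])]
      simp [this]
    · rw [if_neg (by simp only [Bool.or_eq_true, decide_eq_true_eq]; exact hg)]
      by_cases hc : pvCov (lbounds.zip ubounds) v
      · simp [hc, ih]
      · simp only [Bool.not_eq_true] at hc
        simp [hc]

-- coverage is preserved by the merge fold (input sorted by lower bound)
lemma cov_mergeFold (v : Int) (l : List (Int × Int)) :
    ∀ acc : List (Int × Int),
      l.Pairwise (fun a b => a.1 ≤ b.1) →
      (∀ q ∈ acc.getLast?, ∀ p ∈ l, q.1 ≤ p.1) →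
      (pvCov (l.foldl pvMergeStep acc) v = true ↔ pvCov acc v = true ∨ pvCov l v = true) := by
  induction l with
  | nil => intro acc _ _; simp [pvCov]
  | cons p tl ih =>
    intro acc hpw hinv
    obtain ⟨hhead, hpw'⟩ := List.pairwise_cons.mp hpw
    have hkey : pvCov (pvMergeStep acc p) v = true ↔ (pvCov acc v = true ∨ (p.1 ≤ v ∧ v ≤ p.2)) := by
      rcases List.eq_nil_or_concat acc with rfl | ⟨ys, q, rfl⟩
      · simp [pvMergeStep, pvCov]
      · have hq : q.1 ≤ p.1 := hinv q (by simp) p (List.mem_cons_self ..)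
        simp only [pvMergeStep, List.concat_eq_append, List.getLast?_concat]
        by_cases h1 : p.1 ≤ q.2
        · by_cases h2 : q.2 < p.2
          · rw [if_pos h1, if_pos h2]
            simp only [List.dropLast_concat, pvCov, List.any_append, List.any_cons, List.any_nil,
              Bool.or_eq_true, Bool.and_eq_true, decide_eq_true_eq, Bool.or_false]
            constructor
            · rintro (hy | ⟨ha, hb⟩)
              · exact Or.inl (Or.inl hy)
              · by_cases hv : v ≤ q.2
                · exact Or.inl (Or.inr ⟨ha, hv⟩)
                · exact Or.inr ⟨by omega, hb⟩
            · rintro ((hy | ⟨ha, hb⟩) | ⟨ha, hb⟩)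
              · exact Or.inl hy
              · exact Or.inr ⟨ha, by omega⟩
              · exact Or.inr ⟨by omega, hb⟩
          · rw [if_pos h1, if_neg h2]
            simp only [pvCov, List.any_append, List.any_cons, List.any_nil, Bool.or_eq_true,
              Bool.and_eq_true, decide_eq_true_eq, Bool.or_false]
            constructor
            · exact fun h => Or.inl h
            · rintro ((hy | hz) | ⟨ha, hb⟩)
              · exact Or.inl hy
              · exact Or.inr hz
              · exact Or.inr ⟨by omega, by omega⟩
        · rw [if_neg h1]
          simp only [pvCov, List.any_append, List.any_cons, List.any_nil, Bool.or_eq_true,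
            Bool.and_eq_true, decide_eq_true_eq, Bool.or_false]
    have hinv' : ∀ q' ∈ (pvMergeStep acc p).getLast?, ∀ r ∈ tl, q'.1 ≤ r.1 := by
      intro q' hq' r hr
      rcases List.eq_nil_or_concat acc with rfl | ⟨ys, q, rfl⟩
      · simp only [pvMergeStep, List.getLast?_nil, List.getLast?_singleton, Option.mem_def,
          Option.some.injEq] at hq'
        subst hq'
        exact hhead r hr
      · have hq : q.1 ≤ p.1 := hinv q (by simp) p (List.mem_cons_self ..)
        simp only [pvMergeStep, List.concat_eq_append, List.getLast?_concat] at hq'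
        split_ifs at hq' with h1 h2
        · simp only [List.dropLast_concat, List.getLast?_concat, Option.mem_def,
            Option.some.injEq] at hq'
          subst hq'
          have := hhead r hr
          simp only
          omega
        · simp only [List.getLast?_concat, Option.mem_def, Option.some.injEq] at hq'
          subst hq'
          have := hhead r hr
          omega
        · simp only [List.getLast?_concat, Option.mem_def, Option.some.injEq] at hq'
          subst hq'
          exact hhead r hr
    rw [List.foldl_cons, ih (pvMergeStep acc p) hpw' hinv', hkey]
    simp only [pvCov, List.any_cons, Bool.or_eq_true, Bool.and_eq_true, decide_eq_true_eq]
    tauto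

-- pointwise: coverage by the merged intervals = coverage by the raw zipped ranges
lemma cov_merged_eq (ivs : List (Int × Int)) (w : Int) :
    pvCov ((PySem.List.sorted ivs (fun p => p.1)).foldl pvMergeStep []) w = pvCov ivs w := by
  have hsorted : pvCov (PySem.List.sorted ivs (fun p => p.1)) w = pvCov ivs w := by
    rw [Bool.eq_iff_iff]
    simp only [pvCov, List.any_eq_true]
    constructor
    · rintro ⟨x, hx, hxx⟩
      exact ⟨x, (PySem.List.mem_sorted ivs (fun p => p.1) false x).mp hx, hxx⟩
    · rintro ⟨x, hx, hxx⟩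
      exact ⟨x, (PySem.List.mem_sorted ivs (fun p => p.1) false x).mpr hx, hxx⟩
  have h2 := cov_mergeFold w (PySem.List.sorted ivs (fun p => p.1)) []
    (PySem.List.sorted_pairwise ivs (fun p => p.1))
    (by intro q hq; simp [List.getLast?_nil] at hq)
  rw [Bool.eq_iff_iff, h2, ← hsorted]
  simp [pvCov]

-- ===== VERDICT (by name: the statement is the Claim_ definition above) =====
theorem discard_invalid_tickets_spec : Claim_equal_discard_invalid_tickets := by
  intro fields tickets _ hpre
  unfold Spec_discard_invalid_tickets discard_invalid_tickets discard_invalid_tickets_alt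
  obtain ⟨bs, hbs, hlen⟩ := hpre
  have hlb_ne : (pvGetAllbounds fields).1 ≠ [] := by
    rw [pvGetAllbounds_eq]
    simp only [ne_eq, List.flatten_eq_nil_iff]
    intro hall
    exact slice?_even_ne_nil bs hlen (hall _ (List.mem_map_of_mem hbs))
  have hub_ne : (pvGetAllbounds fields).2 ≠ [] := by
    rw [pvGetAllbounds_eq]
    simp only [ne_eq, List.flatten_eq_nil_iff]
    intro hall
    exact slice?_odd_ne_nil bs hlen (hall _ (List.mem_map_of_mem hbs))
  rcases hminEq : PySem.List.min? (pvGetAllbounds fields).1 (fun x => x) with _ | minL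
  · exact absurd ((PySem.List.min?_eq_none_iff _ _).mp hminEq) hlb_ne
  rcases hmaxEq : PySem.List.max? (pvGetAllbounds fields).2 (fun x => x) with _ | maxU
  · exact absurd ((PySem.List.max?_eq_none_iff _ _).mp hmaxEq) hub_ne
  simp only [hminEq, hmaxEq]
  rw [PySem.List.foldl_append_if (fun t => pvTicketOk (pvGetAllbounds fields).1 (pvGetAllbounds fields).2 minL t) (fun t => t) tickets []]
  simp only [List.map_id_fun', id, List.nil_append]
  apply List.filter_congr
  intro t _
  rw [pvTicketOk_eq_all _ _ _ _ hminEq hmaxEq]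
  have : (fun v => pvCov ((pvGetAllbounds fields).1.zip (pvGetAllbounds fields).2) v)
       = (fun v => pvCov ((PySem.List.sorted ((pvGetAllbounds fields).1.zip (pvGetAllbounds fields).2) (fun p => p.1)).foldl pvMergeStep []) v) := by
    funext w
    exact (cov_merged_eq _ w).symm
  rw [this]

theorem discard_invalid_tickets_raises : Claim_raises_discard_invalid_tickets := by
  unfold Claim_raises_discard_invalid_tickets
  constructor
  · rintro fields tickets _ hr ⟨bs, hbs, hlen⟩
    exact absurd (hr bs hbs) (by omega)
  · exact ⟨by decide, by decide, by decide⟩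

-- self-check that the raise witness lies outside Pre_ (specialising the first half of the claim)
theorem pvRaiseWitnessOutsidePre_ok :
    ¬ Pre_discard_invalid_tickets pvRaiseWitness_discard_invalid_tickets.1 pvRaiseWitness_discard_invalid_tickets.2 :=
  discard_invalid_tickets_raises.1 _ _ (by decide) (by decide)
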